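-- pv_equiv track=rewrite | github.com/ansh200516/aarhus | examples/foa/utils/math_utils.py | naive_parse
-- ===== SOURCE A (Python) =====
-- def naive_parse(answer: str) -> str:
--     out = []
--     start = False
--     end = False
--     for l in list(answer)[::-1]:
--         if l in "0123456789" and not end:
--             start = True
--             if l != ',':
--                 out.append(l)
--         else:
--             if start:
--                 end = True
--     out = out[::-1]
--     return "".join(out)
-- ===== SOURCE B (Python) =====
-- import re
--
--
-- def naive_parse(answer: str) -> str:
--     runs = re.findall(r"[0-9]+", answer)
--     return runs[-1] if runs else ""
-- ===== Notes on version B (the rewrite author's own statement) =====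
-- stated objective: idiomatic
-- what changed: Replaces the reverse character-by-character scan with stateful flags by a regex findall of all maximal digit runs followed by taking the last run.
import Mathlib
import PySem

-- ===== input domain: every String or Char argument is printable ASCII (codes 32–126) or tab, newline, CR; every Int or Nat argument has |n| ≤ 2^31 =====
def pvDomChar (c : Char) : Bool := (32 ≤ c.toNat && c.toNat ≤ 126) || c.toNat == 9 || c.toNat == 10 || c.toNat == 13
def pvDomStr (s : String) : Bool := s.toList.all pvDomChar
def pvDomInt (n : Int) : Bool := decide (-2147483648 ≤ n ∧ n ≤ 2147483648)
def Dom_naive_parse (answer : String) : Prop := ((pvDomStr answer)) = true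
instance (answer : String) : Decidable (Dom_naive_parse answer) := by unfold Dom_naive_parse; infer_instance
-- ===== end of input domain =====

-- B replaces A's reverse scan with stateful flags by collecting all maximal digit
-- runs left-to-right (re.findall) and taking the last one (objective: idiomatic).

-- digit test: `l in "0123456789"` (A) / the regex class `[0-9]` (B)
def isDig (c : Char) : Bool := ("0123456789".toList).contains c

-- ===== PORT A =====
-- loop body: state (out, start, end)
def stepA (st : List Char × Bool × Bool) (c : Char) : List Char × Bool × Bool :=
  if isDig c && !st.2.2 then
    ((if c ≠ ',' then st.1 ++ [c] else st.1), true, st.2.2)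
  else
    (st.1, st.2.1, if st.2.1 then true else st.2.2)

def naive_parse (answer : String) : String :=
  -- list(answer)[::-1] is exactly the reversed character list
  let st := (answer.toList.reverse).foldl stepA ([], false, false)
  String.ofList st.1.reverse   -- out = out[::-1]; "".join(out)

-- ===== PORT B =====
-- re.findall(r"[0-9]+", s): the maximal runs of digit characters, left to right
-- (exact for this pattern; cur holds the current run reversed)
def runsAux : List Char → List Char → List (List Char)
  | [], cur => if cur.isEmpty then [] else [cur.reverse]
  | c :: cs, cur =>
    if isDig c then runsAux cs (c :: cur)
    else if cur.isEmpty then runsAux cs []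
    else cur.reverse :: runsAux cs []

def naive_parse_alt (answer : String) : String :=
  let runs := runsAux answer.toList []
  match runs.getLast? with          -- runs[-1] if runs else ""
  | some r => String.ofList r
  | none => ""

-- ===== PRECONDITION & SPEC =====
def Spec_naive_parse (answer : String) (out : String) : Prop := out = naive_parse_alt answer
instance (answer : String) (out : String) : Decidable (Spec_naive_parse answer out) := by unfold Spec_naive_parse; infer_instance

-- ===== CLAIM (what is proved, stated in full; the proofs are below) =====
def Claim_equal_naive_parse : Prop := ∀ (answer : String), Dom_naive_parse answer → Spec_naive_parse answer (naive_parse answer)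

-- ===== LEMMAS AND PROOFS =====

-- the common value: the last maximal digit run of l (empty if none)
def lastRun (l : List Char) : List Char :=
  ((l.reverse.dropWhile (fun c => !isDig c)).takeWhile isDig).reverse

theorem dig_ne_comma (c : Char) (h : isDig c = true) : c ≠ ',' := by
  simp [isDig] at h
  rcases h with h|h|h|h|h|h|h|h|h|h <;> subst h <;> decide

-- once end is set the state never changes
theorem foldl_stepA_end (l : List Char) (out : List Char) (s : Bool) :
    l.foldl stepA (out, s, true) = (out, s, true) := by
  induction l with
  | nil => rfl
  | cons c cs ih =>
      simp only [List.foldl_cons, stepA]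
      cases s <;> simp [ih]

-- with start set and end unset, the digits of the leading run get appended
theorem foldl_stepA_run (l : List Char) (out : List Char) :
    (l.foldl stepA (out, true, false)).1 = out ++ l.takeWhile isDig := by
  induction l generalizing out with
  | nil => simp
  | cons c cs ih =>
      by_cases h : isDig c = true
      · simp only [List.foldl_cons, stepA, h, Bool.not_false, Bool.and_true,
          if_pos (dig_ne_comma c h)]
        simp [ih, h]
      · simp only [Bool.not_eq_true] at h
        simp only [List.foldl_cons, stepA, h]
        simp [foldl_stepA_end, h]

theorem foldl_stepA_main (l : List Char) :
    (l.foldl stepA ([], false, false)).1 =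
      (l.dropWhile (fun c => !isDig c)).takeWhile isDig := by
  induction l with
  | nil => rfl
  | cons c cs ih =>
      by_cases h : isDig c = true
      · simp only [List.foldl_cons, stepA, h, Bool.not_false, Bool.and_true,
          if_pos (dig_ne_comma c h)]
        simp [foldl_stepA_run, h]
      · simp only [Bool.not_eq_true] at h
        simp [List.foldl_cons, stepA, h, ih]

-- so A computes the last maximal digit run
theorem naive_parse_eq_lastRun (answer : String) :
    naive_parse answer = String.ofList (lastRun answer.toList) := by
  show String.ofList ((answer.toList.reverse.foldl stepA ([], false, false)).1.reverse) = _
  rw [foldl_stepA_main, lastRun]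

-- appending behind a non-digit never extends a takeWhile of digits
theorem takeWhile_append_nondig (a : List Char) (c : Char) (t : List Char)
    (hc : isDig c = false) :
    (a ++ c :: t).takeWhile isDig = a.takeWhile isDig := by
  induction a with
  | nil => simp [hc]
  | cons d ds ih =>
      cases hd : isDig d <;> simp [hd, ih]

-- dropWhile skips an all-non-digit prefix
theorem dropWhile_append_nodig (a m : List Char) (h : ∀ x ∈ a, isDig x = false) :
    (a ++ m).dropWhile (fun c => !isDig c) = m.dropWhile (fun c => !isDig c) := by
  induction a with
  | nil => rfl
  | cons d ds ih =>
      have hd : isDig d = false := h d (by simp)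
      simp only [List.cons_append, List.dropWhile_cons, hd]
      exact ih (fun x hx => h x (by simp [hx]))

-- dropWhile stops inside a prefix that contains a digit
theorem dropWhile_append_hasdig (a m : List Char) (h : a.any isDig = true) :
    (a ++ m).dropWhile (fun c => !isDig c) = a.dropWhile (fun c => !isDig c) ++ m := by
  induction a with
  | nil => simp at h
  | cons d ds ih =>
      cases hd : isDig d with
      | true => simp [hd]
      | false =>
          have hds : ds.any isDig = true := by simpa [hd] using h
          simp [hd, ih hds]

-- if cs contains a digit, the last run of pre ++ c :: cs (c not a digit) is that of cs
theorem lastRun_append_of_hasdig (pre : List Char) (c : Char) (cs : List Char)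
    (hc : isDig c = false) (hcs : cs.any isDig = true) :
    lastRun (pre ++ c :: cs) = lastRun cs := by
  have hrev : cs.reverse.any isDig = true := by simpa using hcs
  simp only [lastRun, List.reverse_append, List.reverse_cons]
  rw [List.append_assoc, dropWhile_append_hasdig _ _ hrev, List.cons_append,
    List.nil_append, takeWhile_append_nondig _ _ _ hc]

-- the invariant of runsAux: its last run is the last digit run of cur.reverse ++ l
theorem runsAux_getLast (l : List Char) : ∀ (cur : List Char),
    (∀ c ∈ cur, isDig c = true) →
    (runsAux l cur).getLast? =
      (if (cur.reverse ++ l).any isDig then some (lastRun (cur.reverse ++ l)) else none) := by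
  induction l with
  | nil =>
      intro cur hcur
      cases cur with
      | nil => simp [runsAux]
      | cons d ds =>
          have hd : isDig d = true := hcur d (by simp)
          show [(d :: ds).reverse].getLast? = _
          rw [List.getLast?_singleton, if_pos (by simp [hd])]
          congr 1
          simp only [lastRun, List.append_nil, List.reverse_reverse]
          rw [List.dropWhile_cons_of_neg (by simp [hd]),
            List.takeWhile_eq_self_iff.2 hcur]
  | cons c cs ih =>
      intro cur hcur
      by_cases h : isDig c = true
      · have hcur' : ∀ x ∈ c :: cur, isDig x = true := by
          intro x hx
          rcases List.mem_cons.mp hx with rfl | hx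
          · exact h
          · exact hcur x hx
        have e : (c :: cur).reverse ++ cs = cur.reverse ++ c :: cs := by simp
        simp only [runsAux, h, if_true]
        rw [ih (c :: cur) hcur', e]
      · have hc : isDig c = false := by simpa using h
        have hany : (cur.reverse ++ c :: cs).any isDig
            = (cur.reverse.any isDig || cs.any isDig) := by simp [hc]
        simp only [runsAux, hc, Bool.false_eq_true, if_false]
        by_cases hcemp : cur = []
        · subst hcemp
          simp only [List.isEmpty_nil, if_true]
          rw [ih [] (by simp)]
          by_cases hcs : cs.any isDig = true
          · have e2 : lastRun (c :: cs) = lastRun cs := by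
              simpa using lastRun_append_of_hasdig [] c cs hc hcs
            simp [hcs, hc, e2]
          · have hcs' : cs.any isDig = false := by simpa using hcs
            simp [hc, hcs']
        · have hcemp' : cur.isEmpty = false := by simpa using hcemp
          simp only [hcemp', Bool.false_eq_true, if_false]
          rw [List.getLast?_cons, ih [] (by simp)]
          by_cases hcs : cs.any isDig = true
          · simp only [List.reverse_nil, List.nil_append, hcs, if_true, Option.getD_some]
            rw [lastRun_append_of_hasdig cur.reverse c cs hc hcs, hany]
            simp [hcs]
          · have hcs' : cs.any isDig = false := by simpa using hcs
            simp only [List.reverse_nil, List.nil_append, hcs', Bool.false_eq_true, if_false,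
              Option.getD_none]
            obtain ⟨d, ds, rfl⟩ := List.exists_cons_of_ne_nil hcemp
            have hd : isDig d = true := hcur d (by simp)
            have nod : ∀ x ∈ cs.reverse ++ [c], isDig x = false := by
              intro x hx
              rcases List.mem_append.mp hx with hx | hx
              · have := List.any_eq_false.1 hcs' x (by simpa using hx)
                simpa using this
              · simpa [List.mem_singleton.mp hx] using hc
            have hlast : lastRun ((d :: ds).reverse ++ c :: cs) = (d :: ds).reverse := by
              unfold lastRun
              rw [show ((d :: ds).reverse ++ c :: cs).reverse
                    = (cs.reverse ++ [c]) ++ (d :: ds) from by simp]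
              rw [dropWhile_append_nodig _ _ nod,
                List.dropWhile_cons_of_neg (by simp [hd]),
                List.takeWhile_eq_self_iff.2 hcur]
            have hdd : ((d :: ds).reverse ++ c :: cs).any isDig = true := by
              simp [hd]
            rw [if_pos hdd, hlast]

theorem naive_parse_alt_eq_lastRun (answer : String) :
    naive_parse_alt answer = String.ofList (lastRun answer.toList) := by
  show (match (runsAux answer.toList []).getLast? with
        | some r => String.ofList r
        | none => "") = _
  rw [runsAux_getLast answer.toList [] (by simp)]
  by_cases h : answer.toList.any isDig = true
  · simp [h]
  · have h' : answer.toList.any isDig = false := by simpa using h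
    have hnil : answer.toList.reverse.dropWhile (fun c => !isDig c) = [] := by
      rw [List.dropWhile_eq_nil_iff]
      intro d hd
      have := List.any_eq_false.1 h' d (by simpa using hd)
      simpa using this
    simp [h', lastRun, hnil]

-- ===== VERDICT (by name: the statement is the Claim_ definition above) =====
theorem naive_parse_spec : Claim_equal_naive_parse := by
  intro answer _
  unfold Spec_naive_parse
  rw [naive_parse_eq_lastRun, naive_parse_alt_eq_lastRun]
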